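-- pv_equiv track=rewrite | github.com/pypi-data/pypi-mirror-375 | packages/mseep-mcp-kql-server/mseep_mcp_kql_server-2.0.6-py3-none-any.whl/mcp_kql_server/memory.py | _compress_token
-- ===== SOURCE A (Python) =====
-- from typing import Dict, List, Optional, Any, Tuple, Set
--
-- def _compress_token(token: str, max_size: int) -> Optional[str]:
--     """Compress a token to fit within size limit."""
--     if len(token) <= max_size:
--         return token
--
--     if max_size < 100:  # Too small to compress meaningfully
--         return None
--
--     # Try to keep the most important parts
--     parts = token.split("|")
--     if len(parts) < 4:  # Cluster, database, table, summary minimum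
--         return None
--
--     # Keep cluster, database, table, summary and as many columns as fit
--     essential_parts = parts[:4]  # cluster, database, table, summary
--     essential_size = sum(len(part) + 1 for part in essential_parts)  # +1 for separators
--
--     if essential_size >= max_size:
--         return None
--
--     # Add columns until size limit
--     remaining_size = max_size - essential_size
--     column_parts = []
--
--     for part in parts[4:]:  # Skip essential parts
--         if len(part) + 1 <= remaining_size:  # +1 for separator
--             column_parts.append(part)
--             remaining_size -= len(part) + 1
--         else:
--             break
--
--     compressed_parts = essential_parts + column_parts
--     if len(column_parts) < len(parts) - 4:
--         # Add truncation indicator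
--         compressed_parts.append(f"::COLUMN::truncated_cols>>TYPE<<info%%DESC%%{len(parts) - 4 - len(column_parts)}_more_columns")
--
--     return "|".join(compressed_parts)
-- ===== SOURCE B (Python) =====
-- def _compress_token(token: str, max_size: int):
--     """Compress a token to fit within size limit (cumulative-cost table + binary search)."""
--     if len(token) <= max_size:
--         return token
--     if max_size < 100:
--         return None
--     parts = token.split("|")
--     if len(parts) < 4:
--         return None
--     essential_size = sum(len(p) + 1 for p in parts[:4])
--     if essential_size >= max_size:
--         return None
--     budget = max_size - essential_size
--     cols = parts[4:]
--     cum = [0]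
--     for p in cols:
--         cum.append(cum[-1] + len(p) + 1)
--     # cum is strictly increasing, so binary-search the largest k with cum[k] <= budget
--     lo, hi = 0, len(cols)
--     while lo < hi:
--         mid = (lo + hi + 1) // 2
--         if cum[mid] <= budget:
--             lo = mid
--         else:
--             hi = mid - 1
--     k = lo
--     out = parts[:4 + k]
--     if k < len(cols):
--         out.append(f"::COLUMN::truncated_cols>>TYPE<<info%%DESC%%{len(cols) - k}_more_columns")
--     return "|".join(out)
-- ===== Notes on version B (the rewrite author's own statement) =====
-- stated objective: alternative
-- what changed: Replaces A's greedy loop that walks the columns mutating a remaining budget and breaking on overflow with a staged design: build a cumulative separator-inclusive cost table once, binary-search it (cum is strictly increasing) for the largest k of columns that fit, then slice parts[:4+k] and append the truncation marker iff k < #columns.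
import Mathlib
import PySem

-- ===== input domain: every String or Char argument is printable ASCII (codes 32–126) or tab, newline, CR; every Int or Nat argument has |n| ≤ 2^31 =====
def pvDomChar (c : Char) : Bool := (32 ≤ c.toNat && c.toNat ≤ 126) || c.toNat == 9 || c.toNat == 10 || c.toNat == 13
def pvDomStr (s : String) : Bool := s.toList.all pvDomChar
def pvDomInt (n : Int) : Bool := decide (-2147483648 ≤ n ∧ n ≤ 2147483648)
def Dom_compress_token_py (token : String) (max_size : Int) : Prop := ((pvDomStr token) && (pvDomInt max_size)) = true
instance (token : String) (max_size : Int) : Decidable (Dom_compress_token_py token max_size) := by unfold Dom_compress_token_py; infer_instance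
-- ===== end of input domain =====

-- B replaces A's budget-mutating greedy scan by a cumulative-cost table plus binary search; same result, similar cost (objective: alternative).

-- ===== PORT A =====
-- A's for-loop over parts[4:] with break, maintaining remaining_size
def pvGreedyA : List String → Int → List String
  | [], _ => []
  | p :: ps, rem =>
    if PySem.Str.len p + 1 ≤ rem then p :: pvGreedyA ps (rem - (PySem.Str.len p + 1))
    else []

def compress_token_py (token : String) (max_size : Int) : Option String :=
  if PySem.Str.len token ≤ max_size then some token
  else if max_size < 100 then none
  else
    let parts := (PySem.Str.split? token "|").getD []
    if parts.length < 4 then none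
    else
      let essential_parts := parts.take 4
      let essential_size := (essential_parts.map (fun p => PySem.Str.len p + 1)).sum
      if essential_size ≥ max_size then none
      else
        let remaining_size := max_size - essential_size
        let column_parts := pvGreedyA (parts.drop 4) remaining_size
        let compressed_parts := essential_parts ++ column_parts
        let compressed_parts :=
          if column_parts.length < parts.length - 4 then
            compressed_parts ++ ["::COLUMN::truncated_cols>>TYPE<<info%%DESC%%" ++
              PySem.Int.toStr ((parts.length : Int) - 4 - column_parts.length) ++ "_more_columns"]
          else compressed_parts
        some (PySem.Str.join "|" compressed_parts)

-- ===== PORT B =====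
-- B's loop appending cum[-1] + len(p) + 1 to the cumulative table
def pvCumB : Int → List String → List Int
  | _, [] => []
  | last, p :: ps => (last + (PySem.Str.len p + 1)) :: pvCumB (last + (PySem.Str.len p + 1)) ps

-- B's while-loop binary search: largest k in [lo, hi] with cum[k] ≤ budget
def pvBS (cum : List Int) (budget : Int) (lo hi : Nat) : Nat :=
  if h : lo < hi then
    let mid := (lo + hi + 1) / 2
    if cum.getD mid 0 ≤ budget then pvBS cum budget mid hi
    else pvBS cum budget lo (mid - 1)
  else lo
termination_by hi - lo
decreasing_by
  · omega
  · omega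

def compress_token_py_alt (token : String) (max_size : Int) : Option String :=
  if PySem.Str.len token ≤ max_size then some token
  else if max_size < 100 then none
  else
    let parts := (PySem.Str.split? token "|").getD []
    if parts.length < 4 then none
    else
      let essential_size := ((parts.take 4).map (fun p => PySem.Str.len p + 1)).sum
      if essential_size ≥ max_size then none
      else
        let budget := max_size - essential_size
        let cols := parts.drop 4
        let cum : List Int := 0 :: pvCumB 0 cols
        let k := pvBS cum budget 0 cols.length
        let out := parts.take (4 + k)
        let out := if k < cols.length then
            out ++ ["::COLUMN::truncated_cols>>TYPE<<info%%DESC%%" ++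
              PySem.Int.toStr ((cols.length : Int) - k) ++ "_more_columns"]
          else out
        some (PySem.Str.join "|" out)

-- ===== PRECONDITION & SPEC =====
def Spec_compress_token_py (token : String) (max_size : Int) (out : Option String) : Prop := out = compress_token_py_alt token max_size
instance (token : String) (max_size : Int) (out : Option String) : Decidable (Spec_compress_token_py token max_size out) := by unfold Spec_compress_token_py; infer_instance

-- ===== CLAIM (what is proved, stated in full; the proofs are below) =====
def Claim_equal_compress_token_py : Prop := ∀ (token : String) (max_size : Int), Dom_compress_token_py token max_size → Spec_compress_token_py token max_size (compress_token_py token max_size)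

-- ===== LEMMAS AND PROOFS =====

theorem pvStrLen_nonneg (p : String) : 0 ≤ PySem.Str.len p := by
  simp [PySem.Str.len_eq]

theorem pvCumB_length (a : Int) (ps : List String) : (pvCumB a ps).length = ps.length := by
  induction ps generalizing a with
  | nil => rfl
  | cons p ps ih => simp [pvCumB, ih]

-- every entry of the cumulative table exceeds its base
theorem pvCumB_gt (a : Int) (ps : List String) : ∀ x ∈ pvCumB a ps, a < x := by
  induction ps generalizing a with
  | nil => intro x hx; simp [pvCumB] at hx
  | cons p ps ih =>
    intro x hx
    simp only [pvCumB, List.mem_cons] at hx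
    have hp := pvStrLen_nonneg p
    rcases hx with rfl | hx
    · omega
    · have := ih (a + (PySem.Str.len p + 1)) x hx
      omega

-- the cumulative table (with its base prepended) is strictly increasing
theorem pvCumB_pairwise (a : Int) (ps : List String) :
    (a :: pvCumB a ps).Pairwise (· < ·) := by
  induction ps generalizing a with
  | nil => simp [pvCumB]
  | cons p ps ih =>
    simp only [pvCumB]
    rw [List.pairwise_cons]
    refine ⟨?_, ih (a + (PySem.Str.len p + 1))⟩
    intro x hx
    have hp := pvStrLen_nonneg p
    simp only [List.mem_cons] at hx
    rcases hx with rfl | hx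
    · omega
    · have := pvCumB_gt (a + (PySem.Str.len p + 1)) ps x hx
      omega

-- shifting the base shifts every entry
theorem pvCumB_shift (a b : Int) (qs : List String) :
    pvCumB (a + b) qs = (pvCumB b qs).map (fun x => a + x) := by
  induction qs generalizing b with
  | nil => rfl
  | cons q qs ihq =>
    simp only [pvCumB, List.map_cons, add_assoc]
    exact congrArg _ (ihq _)

-- A's greedy loop keeps exactly those columns whose cumulative cost fits the budget
theorem pvGreedy_eq_take (ps : List String) (rem : Int) :
    pvGreedyA ps rem =
      ps.take (((pvCumB 0 ps).filter (fun c => decide (c ≤ rem))).length) := by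
  induction ps generalizing rem with
  | nil => rfl
  | cons p ps ih =>
    simp only [pvCumB, zero_add, List.filter_cons]
    by_cases h : PySem.Str.len p + 1 ≤ rem
    · have hshift : pvCumB (PySem.Str.len p + 1) ps
          = (pvCumB 0 ps).map (fun x => (PySem.Str.len p + 1) + x) := by
        have := pvCumB_shift (PySem.Str.len p + 1) 0 ps
        simpa using this
      have hlen' : ((pvCumB (PySem.Str.len p + 1) ps).filter (fun c => decide (c ≤ rem))).length
          = ((pvCumB 0 ps).filter (fun c => decide (c ≤ rem - (PySem.Str.len p + 1)))).length := by
        rw [hshift, List.filter_map, List.length_map]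
        congr 1
        apply List.filter_congr
        intro x _
        simp only [Function.comp_apply, decide_eq_decide]
        omega
      simp only [pvGreedyA, if_pos h, decide_eq_true h, if_true, List.length_cons,
        List.take_succ_cons]
      rw [ih (rem - (PySem.Str.len p + 1)), hlen']
    · have hpair := pvCumB_pairwise (PySem.Str.len p + 1) ps
      have hgt : ∀ x ∈ pvCumB (PySem.Str.len p + 1) ps, PySem.Str.len p + 1 < x := by
        intro x hx
        exact (List.pairwise_cons.mp hpair).1 x hx
      have hempty : (pvCumB (PySem.Str.len p + 1) ps).filter (fun c => decide (c ≤ rem)) = [] := by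
        rw [List.filter_eq_nil_iff]
        intro x hx
        have := hgt x hx
        simp only [decide_eq_true_eq]
        omega
      have hd : (decide (PySem.Str.len p + 1 ≤ rem)) = false := by
        rw [decide_eq_false_iff_not]
        exact h
      simp only [pvGreedyA, if_neg h, hd, Bool.false_eq_true, if_false, hempty,
        List.length_nil, List.take_zero]

-- on a strictly increasing list, "≤ b" holds exactly on the filtered prefix of indices
theorem pvFilter_threshold (A : List Int) (b : Int) (hinc : A.Pairwise (· < ·)) :
    ∀ i (h : i < A.length), (A[i] ≤ b ↔ i < (A.filter (fun c => decide (c ≤ b))).length) := by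
  induction A with
  | nil => intro i h; simp at h
  | cons x A ih =>
    have hx1 := (List.pairwise_cons.mp hinc).1
    have hx2 := (List.pairwise_cons.mp hinc).2
    intro i h
    by_cases hx : x ≤ b
    · simp only [List.filter_cons, decide_eq_true hx, List.length_cons]
      cases i with
      | zero => simpa using hx
      | succ j =>
        have hj : j < A.length := by simpa using h
        have := ih hx2 j hj
        simpa using this
    · have hempty : A.filter (fun c => decide (c ≤ b)) = [] := by
        rw [List.filter_eq_nil_iff]
        intro c hc
        have := hx1 c hc
        simp only [decide_eq_true_eq]
        omega
      have hlen : ((x :: A).filter (fun c => decide (c ≤ b))).length = 0 := by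
        simp [List.filter_cons, hx, hempty]
      rw [hlen]
      cases i with
      | zero => simpa using hx
      | succ j =>
        have hj : j < A.length := by simpa using h
        have := hx1 A[j] (A.getElem_mem hj)
        simp only [List.getElem_cons_succ]
        omega

-- the binary search returns k whenever "cum[i] ≤ budget ↔ i ≤ k" on [0, n]
theorem pvBS_eq (cum : List Int) (budget : Int) (k n : Nat)
    (hT : ∀ i, i ≤ n → (cum.getD i 0 ≤ budget ↔ i ≤ k)) :
    ∀ d lo hi, hi - lo ≤ d → lo ≤ k → k ≤ hi → hi ≤ n → pvBS cum budget lo hi = k := by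
  intro d
  induction d with
  | zero =>
    intro lo hi hd hlo hhi hn
    rw [pvBS]
    have : ¬ lo < hi := by omega
    rw [dif_neg this]
    omega
  | succ d ih =>
    intro lo hi hd hlo hhi hn
    rw [pvBS]
    by_cases h : lo < hi
    · rw [dif_pos h]
      by_cases hm : cum.getD ((lo + hi + 1) / 2) 0 ≤ budget
      · rw [if_pos hm]
        have hmk : (lo + hi + 1) / 2 ≤ k := (hT _ (by omega)).mp hm
        exact ih _ _ (by omega) hmk hhi hn
      · rw [if_neg hm]
        have hmk : ¬ ((lo + hi + 1) / 2 ≤ k) := fun hk => hm ((hT _ (by omega)).mpr hk)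
        exact ih _ _ (by omega) hlo (by omega) (by omega)
    · rw [dif_neg h]; omega

-- ===== VERDICT (by name: the statement is the Claim_ definition above) =====
theorem compress_token_py_spec : Claim_equal_compress_token_py := by
  intro token max_size _hdom
  unfold Spec_compress_token_py compress_token_py compress_token_py_alt
  by_cases h1 : PySem.Str.len token ≤ max_size
  · rw [if_pos h1, if_pos h1]
  · rw [if_neg h1, if_neg h1]
    by_cases h2 : max_size < 100
    · rw [if_pos h2, if_pos h2]
    · rw [if_neg h2, if_neg h2]
      set parts := (PySem.Str.split? token "|").getD [] with hparts
      by_cases h3 : parts.length < 4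
      · rw [if_pos h3, if_pos h3]
      · rw [if_neg h3, if_neg h3]
        push_neg at h3
        set esz := ((parts.take 4).map (fun p => PySem.Str.len p + 1)).sum with hesz
        by_cases h4 : esz ≥ max_size
        · rw [if_pos h4, if_pos h4]
        · rw [if_neg h4, if_neg h4]
          set budget := max_size - esz with hbudget
          set cols := parts.drop 4 with hcols
          set A := pvCumB 0 cols with hA
          set kstar := ((A.filter (fun c => decide (c ≤ budget))).length) with hk
          have hAlen : A.length = cols.length := by rw [hA, pvCumB_length]
          have hkn : kstar ≤ cols.length := by
            rw [hk, ← hAlen]; exact List.length_filter_le _ _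
          have hbpos : 0 < budget := by omega
          have hT : ∀ i, i ≤ cols.length → (((0 : Int) :: A).getD i 0 ≤ budget ↔ i ≤ kstar) := by
            intro i hi
            cases i with
            | zero =>
              simp only [List.getD_cons_zero]
              constructor
              · intro _; omega
              · intro _; omega
            | succ j =>
              have hj : j < A.length := by omega
              have hget : ((0 : Int) :: A).getD (j + 1) 0 = A[j] := by
                simp [List.getD_cons_succ, List.getD, List.getElem?_eq_getElem hj]
              rw [hget]
              have hpair : A.Pairwise (· < ·) := by
                have := pvCumB_pairwise 0 cols
                exact (List.pairwise_cons.mp this).2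
              have := pvFilter_threshold A budget hpair j hj
              rw [this, hk]
              omega
          have hbs : pvBS ((0 : Int) :: A) budget 0 cols.length = kstar :=
            pvBS_eq _ _ kstar cols.length hT cols.length 0 cols.length (by omega)
              (by omega) hkn (le_refl _)
          have hgreedy : pvGreedyA cols budget = cols.take kstar := by
            rw [pvGreedy_eq_take, hk, hA]
          have hcollen : (cols.take kstar).length = kstar := by
            simp only [List.length_take]; omega
          have htake : parts.take 4 ++ cols.take kstar = parts.take (4 + kstar) := by
            rw [hcols, List.take_add]
          dsimp only
          rw [hbs, hgreedy, hcollen, htake]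
          have hclen : cols.length = parts.length - 4 := by
            rw [hcols, List.length_drop]
          by_cases h5 : kstar < parts.length - 4
          · rw [if_pos h5, if_pos (by omega : kstar < cols.length)]
            have : (parts.length : Int) - 4 - (kstar : Int) = (cols.length : Int) - (kstar : Int) := by
              have h4le : 4 ≤ parts.length := h3
              omega
            rw [this]
          · rw [if_neg h5, if_neg (by omega : ¬ kstar < cols.length)]
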